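-- pv_equiv track=rewrite | github.com/RUCKBReasoning/SubgraphRetrievalKBQA | src/retrieve_subgraph/retrieve_subgraph_for_finetune.py | merge_graph
-- ===== SOURCE A (Python) =====
-- from typing import Tuple, List, Any, Dict, Set
--
-- def _reverse_graph(G:Dict[str, List[str]]):
--     r_G:Dict[str,List[str]] = dict()
--     for u in G:
--         for v in G[u]:
--             r_G.setdefault(v, []).append(u)
--     return r_G
--
-- def bfs_graph(G:Dict[str, List[str]],root):
--     """
--     G: a adjacency list in Dict
--     return: all bfs nodes
--     """
--     visited = set()
--     currentLevel = [root]
--     while currentLevel: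
--         for v in currentLevel:
--             visited.add(v)
--         nextLevel = set()
--         # levelGraph = {v:set() for v in currentLevel}
--         for v in currentLevel:
--             for w in G.get(v,[]):
--                 if w not in visited:
--                     # levelGraph[v].add(w)
--                     nextLevel.add(w)
--         # yield levelGraph
--         currentLevel = nextLevel
--     return visited
--
-- def merge_graph(graph_l, root_l, graph_r, root_r):
--     assert root_l != root_r
--     all_nodes = set()
--     common_nodes = set(graph_l) & set(graph_r)
--     all_nodes |= common_nodes
--     reverse_graph_l, reverse_graph_r = _reverse_graph(graph_l), _reverse_graph(graph_r)
--     for node in common_nodes: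
--         ancestors_l = bfs_graph(reverse_graph_l, node)
--         ancestors_r = bfs_graph(reverse_graph_r, node)
--         descendants_l = bfs_graph(graph_l, node)
--         descendants_r = bfs_graph(graph_r, node)
--         all_nodes.update(ancestors_l)
--         all_nodes.update(ancestors_r)
--         all_nodes.update(descendants_l)
--         all_nodes.update(descendants_r)
--     return all_nodes
-- ===== SOURCE B (Python) =====
-- def _reach(succ, root):
--     seen = [root]
--     i = 0
--     while i < len(seen):
--         for w in succ(seen[i]):
--             if w not in seen:
--                 seen.append(w)
--         i += 1
--     return seen
--
-- def merge_graph(graph_l, root_l, graph_r, root_r):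
--     assert root_l != root_r
--     common = [u for u in graph_l if u in graph_r]
--     all_nodes = set(common)
--     for node in common:
--         all_nodes.update(_reach(lambda v: [u for u in graph_l if v in graph_l[u]], node))
--         all_nodes.update(_reach(lambda v: [u for u in graph_r if v in graph_r[u]], node))
--         all_nodes.update(_reach(lambda v: graph_l.get(v, []), node))
--         all_nodes.update(_reach(lambda v: graph_r.get(v, []), node))
--     return all_nodes
-- ===== Notes on version B (the rewrite author's own statement) =====
-- stated objective: alternative
-- what changed: B replaces A's per-node level-set BFS over materialized reverse graphs (frontier sets, visited set, _reverse_graph with setdefault/append) by a single-list cursor-queue reachability walk per direction, finding predecessors by scanning the graph directly instead of building reverse adjacency dicts.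
import Mathlib
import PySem

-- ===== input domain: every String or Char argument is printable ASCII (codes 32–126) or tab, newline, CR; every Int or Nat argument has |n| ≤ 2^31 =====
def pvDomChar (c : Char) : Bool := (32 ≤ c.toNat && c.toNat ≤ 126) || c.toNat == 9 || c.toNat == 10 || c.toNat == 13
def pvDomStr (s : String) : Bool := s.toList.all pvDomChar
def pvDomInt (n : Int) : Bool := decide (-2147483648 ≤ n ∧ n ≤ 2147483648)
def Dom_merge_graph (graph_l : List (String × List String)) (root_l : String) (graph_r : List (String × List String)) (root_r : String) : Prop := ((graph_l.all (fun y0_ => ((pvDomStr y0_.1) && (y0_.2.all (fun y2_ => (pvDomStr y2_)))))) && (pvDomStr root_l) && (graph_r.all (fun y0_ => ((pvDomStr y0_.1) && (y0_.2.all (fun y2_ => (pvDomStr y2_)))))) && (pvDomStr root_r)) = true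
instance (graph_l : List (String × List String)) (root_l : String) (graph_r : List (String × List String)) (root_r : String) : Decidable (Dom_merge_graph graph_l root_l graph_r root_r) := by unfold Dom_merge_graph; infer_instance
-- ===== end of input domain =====

-- B replaces A's per-node level-set BFS over materialized reverse graphs by a cursor-queue
-- reachability walk over neighbour functions (predecessors found by scanning the graph directly);
-- objective: alternative structure, not speed. Both return the same Python set; the ports below
-- agree element-for-element in the same order.

-- ===== PORT A =====
-- _reverse_graph: r_G.setdefault(v, []).append(u) for every edge u -> v
def pvRevGraph (G : PySem.Dict String (List String)) : PySem.Dict String (List String) :=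
  G.items.foldl (fun rG p => p.2.foldl (fun rG v => rG.modify v [] (fun l => l ++ [p.1])) rG) PySem.Dict.empty

-- the while-loop of bfs_graph; fuel only makes the recursion structural (it is never exhausted:
-- each round with a nonempty level permanently visits at least one new node drawn from G's values)
def pvBfsLoop (f : String → List String) : Nat → PySem.Set String → List String → PySem.Set String
  | 0, visited, _ => visited
  | _ + 1, visited, [] => visited
  | fuel + 1, visited, c :: cs =>
      let visited' := (c :: cs).foldl PySem.Set.add visited
      let next := (c :: cs).foldl (fun nl v =>
        (f v).foldl (fun nl w => if PySem.Set.contains visited' w then nl else PySem.Set.add nl w) nl) PySem.Set.empty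
      pvBfsLoop f fuel visited' next

def bfs_graph (G : PySem.Dict String (List String)) (root : String) : PySem.Set String :=
  pvBfsLoop (fun v => G.getD v []) (G.values.flatten.length + 2) PySem.Set.empty [root]

-- `assert root_l != root_r` raises on root_l = root_r: excluded by Pre_merge_graph
def merge_graph (graph_l : List (String × List String)) (root_l : String) (graph_r : List (String × List String)) (root_r : String) : List String :=
  let gl := PySem.Dict.ofList graph_l
  let gr := PySem.Dict.ofList graph_r
  let common := PySem.Set.inter (PySem.Set.ofList gl.keys) (PySem.Set.ofList gr.keys)
  let all_nodes := PySem.Set.union PySem.Set.empty common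
  let rgl := pvRevGraph gl
  let rgr := pvRevGraph gr
  common.foldl (fun acc node =>
    let ancestors_l := bfs_graph rgl node
    let ancestors_r := bfs_graph rgr node
    let descendants_l := bfs_graph gl node
    let descendants_r := bfs_graph gr node
    PySem.Set.update (PySem.Set.update (PySem.Set.update (PySem.Set.update acc ancestors_l) ancestors_r) descendants_l) descendants_r) all_nodes

-- ===== PORT B =====
-- [u for u in graph if v in graph[u]]
def pvPreds (g : PySem.Dict String (List String)) (v : String) : List String :=
  (g.items.filter (fun p => p.2.contains v)).map (fun p => p.1)

-- _reach: seen list grown in place, cursor i; `if w not in seen: seen.append(w)` is PySem.Set.add.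
-- fuel only makes the while-loop structural (never exhausted: each step moves the cursor once and
-- the seen list cannot outgrow root plus the range of succ)
def pvReach (succ : String → List String) : Nat → List String → Nat → List String
  | 0, seen, _ => seen
  | fuel + 1, seen, i =>
      if h : i < seen.length then
        pvReach succ fuel ((succ seen[i]).foldl PySem.Set.add seen) (i + 1)
      else seen

-- `assert root_l != root_r` raises on root_l = root_r: excluded by Pre_merge_graph
def merge_graph_alt (graph_l : List (String × List String)) (root_l : String) (graph_r : List (String × List String)) (root_r : String) : List String :=
  let gl := PySem.Dict.ofList graph_l
  let gr := PySem.Dict.ofList graph_r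
  let common := gl.keys.filter (fun u => gr.contains u)
  common.foldl (fun acc node =>
    let acc := PySem.Set.update acc (pvReach (fun v => pvPreds gl v) (gl.size + 2) [node] 0)
    let acc := PySem.Set.update acc (pvReach (fun v => pvPreds gr v) (gr.size + 2) [node] 0)
    let acc := PySem.Set.update acc (pvReach (fun v => gl.getD v []) (gl.values.flatten.length + 2) [node] 0)
    PySem.Set.update acc (pvReach (fun v => gr.getD v []) (gr.values.flatten.length + 2) [node] 0)) (PySem.Set.ofList common)

-- ===== PRECONDITION & SPEC =====
-- exactly the inputs where A returns: `assert root_l != root_r` raises AssertionError otherwise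
def Pre_merge_graph (graph_l : List (String × List String)) (root_l : String) (graph_r : List (String × List String)) (root_r : String) : Prop := root_l ≠ root_r
instance (graph_l : List (String × List String)) (root_l : String) (graph_r : List (String × List String)) (root_r : String) : Decidable (Pre_merge_graph graph_l root_l graph_r root_r) := by unfold Pre_merge_graph; infer_instance
def pvWitness_merge_graph : (List (String × List String)) × String × (List (String × List String)) × String :=
  ([("a", ["b"]), ("b", ["c"])], "a", [("b", ["a"])], "b")
def Spec_merge_graph (graph_l : List (String × List String)) (root_l : String) (graph_r : List (String × List String)) (root_r : String) (out : List String) : Prop := out = merge_graph_alt graph_l root_l graph_r root_r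
instance (graph_l : List (String × List String)) (root_l : String) (graph_r : List (String × List String)) (root_r : String) (out : List String) : Decidable (Spec_merge_graph graph_l root_l graph_r root_r out) := by unfold Spec_merge_graph; infer_instance

-- ===== CLAIM (what is proved, stated in full; the proofs are below) =====
def Claim_equal_merge_graph : Prop := ∀ (graph_l : List (String × List String)) (root_l : String) (graph_r : List (String × List String)) (root_r : String), Dom_merge_graph graph_l root_l graph_r root_r → Pre_merge_graph graph_l root_l graph_r root_r → Spec_merge_graph graph_l root_l graph_r root_r (merge_graph graph_l root_l graph_r root_r)

-- ===== LEMMAS AND PROOFS =====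

-- the body of A's nextLevel loop, named for the proofs
def pvNext (f : String → List String) (V' : PySem.Set String) (cur : List String) : List String :=
  cur.foldl (fun nl v =>
    (f v).foldl (fun nl w => if PySem.Set.contains V' w then nl else PySem.Set.add nl w) nl) []

theorem pvBfsLoop_cons (f : String → List String) (fuel : Nat) (V : PySem.Set String) (c : String) (cs : List String) :
    pvBfsLoop f (fuel + 1) V (c :: cs) =
    pvBfsLoop f fuel (PySem.Set.update V (c :: cs)) (pvNext f (PySem.Set.update V (c :: cs)) (c :: cs)) := rfl

theorem pvReach_stop (g : String → List String) (fuel : Nat) (seen : List String) (i : Nat)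
    (h : ¬ i < seen.length) : pvReach g fuel seen i = seen := by
  cases fuel <;> simp [pvReach, h]

theorem pvReach_step (g : String → List String) (fuel : Nat) (seen : List String) (i : Nat)
    (h : i < seen.length) : pvReach g (fuel + 1) seen i =
      pvReach g fuel ((g seen[i]).foldl PySem.Set.add seen) (i + 1) := by
  simp [pvReach, h]

theorem pv_foldl_add_prefix (l : List String) (s : PySem.Set String) :
    ∃ δ, List.foldl PySem.Set.add s l = s ++ δ := by
  induction l generalizing s with
  | nil => exact ⟨[], by simp⟩
  | cons a l ih =>
    simp only [List.foldl_cons]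
    by_cases h : a ∈ s
    · rw [PySem.Set.add_of_mem h]
      exact ih s
    · rw [PySem.Set.add_of_not_mem h]
      rcases ih (s ++ [a]) with ⟨δ, hδ⟩
      exact ⟨a :: δ, by simpa using hδ⟩


theorem pv_foldl_add_split (ws : List String) (s t : PySem.Set String) :
    List.foldl PySem.Set.add (s ++ t) ws =
    s ++ List.foldl (fun nl w => if PySem.Set.contains s w then nl else PySem.Set.add nl w) t ws := by
  induction ws generalizing t with
  | nil => rfl
  | cons w ws ih =>
    simp only [List.foldl_cons]
    by_cases hs : w ∈ s
    · have h1 : PySem.Set.add (s ++ t) w = s ++ t := PySem.Set.add_of_mem (by simp [hs])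
      have h2 : PySem.Set.contains s w = true := (PySem.Set.contains_iff s w).2 hs
      rw [h1, h2, if_pos rfl]
      exact ih t
    · have h2 : ¬ PySem.Set.contains s w = true := fun h => hs ((PySem.Set.contains_iff s w).1 h)
      rw [if_neg h2]
      by_cases ht : w ∈ t
      · have h1 : PySem.Set.add (s ++ t) w = s ++ t := PySem.Set.add_of_mem (by simp [ht])
        rw [h1, PySem.Set.add_of_mem ht]
        exact ih t
      · have h1 : PySem.Set.add (s ++ t) w = (s ++ t) ++ [w] :=
          PySem.Set.add_of_not_mem (by simp [hs, ht])
        rw [h1, PySem.Set.add_of_not_mem ht, List.append_assoc]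
        exact ih (t ++ [w])


theorem pv_level_fold (f : String → List String) (cur : List String) (s t : PySem.Set String) :
    cur.foldl (fun st v => List.foldl PySem.Set.add st (f v)) (s ++ t) =
    s ++ cur.foldl (fun nl v =>
      (f v).foldl (fun nl w => if PySem.Set.contains s w then nl else PySem.Set.add nl w) nl) t := by
  induction cur generalizing t with
  | nil => rfl
  | cons v vs ih =>
    simp only [List.foldl_cons]
    rw [pv_foldl_add_split]
    exact ih _


theorem pv_checkfold_props (l : List String) (V' : PySem.Set String) (acc : List String) :
    ((acc.Nodup → (l.foldl (fun nl w => if PySem.Set.contains V' w then nl else PySem.Set.add nl w) acc).Nodup) ∧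
     ∀ x ∈ l.foldl (fun nl w => if PySem.Set.contains V' w then nl else PySem.Set.add nl w) acc,
       x ∈ acc ∨ (x ∈ l ∧ x ∉ V')) := by
  induction l generalizing acc with
  | nil => exact ⟨fun h => h, fun x hx => Or.inl hx⟩
  | cons w l ih =>
    simp only [List.foldl_cons]
    by_cases hc : PySem.Set.contains V' w = true
    · rw [if_pos hc]
      rcases ih acc with ⟨ihn, ihm⟩
      refine ⟨ihn, fun x hx => ?_⟩
      rcases ihm x hx with h | ⟨h1, h2⟩
      · exact Or.inl h
      · exact Or.inr ⟨List.mem_cons_of_mem _ h1, h2⟩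
    · rw [if_neg hc]
      rcases ih (PySem.Set.add acc w) with ⟨ihn, ihm⟩
      refine ⟨fun hn => ihn (PySem.Set.nodup_add _ _ hn), fun x hx => ?_⟩
      rcases ihm x hx with h | ⟨h1, h2⟩
      · rw [PySem.Set.mem_add] at h
        rcases h with h' | h'
        · exact Or.inl h'
        · subst h'
          exact Or.inr ⟨List.mem_cons_self, fun hm => hc ((PySem.Set.contains_iff V' x).2 hm)⟩
      · exact Or.inr ⟨List.mem_cons_of_mem _ h1, h2⟩


theorem pvNext_props (f : String → List String) (V' : PySem.Set String) (cur : List String) :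
    ((pvNext f V' cur).Nodup ∧
     ∀ x ∈ pvNext f V' cur, (∃ v ∈ cur, x ∈ f v) ∧ x ∉ V') := by
  have aux : ∀ (cs : List String) (acc : List String),
      (acc.Nodup → (cs.foldl (fun nl v =>
        (f v).foldl (fun nl w => if PySem.Set.contains V' w then nl else PySem.Set.add nl w) nl) acc).Nodup) ∧
      (∀ x ∈ cs.foldl (fun nl v =>
        (f v).foldl (fun nl w => if PySem.Set.contains V' w then nl else PySem.Set.add nl w) nl) acc,
        x ∈ acc ∨ ((∃ v ∈ cs, x ∈ f v) ∧ x ∉ V')) := by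
    intro cs
    induction cs with
    | nil => intro acc; exact ⟨fun h => h, fun x hx => Or.inl hx⟩
    | cons v vs ih =>
      intro acc
      simp only [List.foldl_cons]
      rcases pv_checkfold_props (f v) V' acc with ⟨hn1, hm1⟩
      rcases ih ((f v).foldl (fun nl w => if PySem.Set.contains V' w then nl else PySem.Set.add nl w) acc) with ⟨hn2, hm2⟩
      refine ⟨fun hn => hn2 (hn1 hn), fun x hx => ?_⟩
      rcases hm2 x hx with h | ⟨⟨u, hu, hxu⟩, hv⟩
      · rcases hm1 x h with h' | ⟨h1, h2⟩
        · exact Or.inl h'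
        · exact Or.inr ⟨⟨v, by simp, h1⟩, h2⟩
      · exact Or.inr ⟨⟨u, by simp [hu], hxu⟩, hv⟩
  rcases aux cur [] with ⟨hn, hm⟩
  refine ⟨hn List.nodup_nil, fun x hx => ?_⟩
  rcases hm x hx with h | h
  · cases h
  · exact h


theorem pv_filter_drop (U seen : List String) (w : String) (hw : w ∈ U) (hns : w ∉ seen) :
    (U.filter (fun x => !(seen ++ [w]).contains x)).length + 1 ≤
    (U.filter (fun x => !seen.contains x)).length := by
  have hEq : U.filter (fun x => !(seen ++ [w]).contains x)
      = (U.filter (fun x => !seen.contains x)).filter (fun x => !(x == w)) := by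
    rw [List.filter_filter]
    apply List.filter_congr
    intro x _
    by_cases h1 : x ∈ seen <;> by_cases h2 : x = w <;>
      simp [List.contains_eq_mem, h1, h2]
  rw [hEq]
  have hwmem : w ∈ U.filter (fun x => !seen.contains x) := by
    simp [List.mem_filter, hw, List.contains_eq_mem, hns]
  have hlt : ((U.filter (fun x => !seen.contains x)).filter (fun x => !(x == w))).length <
      (U.filter (fun x => !seen.contains x)).length := by
    simp only [List.length_filter_lt_length_iff_exists]
    exact ⟨w, hwmem, by simp⟩
  omega


theorem pv_addfold_count (UB : List String) (l seen : List String)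
    (hl : ∀ w ∈ l, w ∈ UB) (hn : seen.Nodup) :
    (l.foldl PySem.Set.add seen).Nodup ∧
    seen.length ≤ (l.foldl PySem.Set.add seen).length ∧
    (l.foldl PySem.Set.add seen).length + (UB.filter (fun x => !(l.foldl PySem.Set.add seen).contains x)).length ≤
      seen.length + (UB.filter (fun x => !seen.contains x)).length := by
  induction l generalizing seen with
  | nil => exact ⟨hn, le_refl _, le_refl _⟩
  | cons w l ih =>
    simp only [List.foldl_cons]
    by_cases hw : w ∈ seen
    · rw [PySem.Set.add_of_mem hw]
      exact ih seen (fun x hx => hl x (List.mem_cons_of_mem _ hx)) hn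
    · rw [PySem.Set.add_of_not_mem hw]
      have hn' : (seen ++ [w]).Nodup := by
        simp only [List.nodup_append, List.nodup_cons]
        exact ⟨hn, by simp, fun a ha => by simp; rintro rfl; exact hw ha⟩
      rcases ih (seen ++ [w]) (fun x hx => hl x (List.mem_cons_of_mem _ hx)) hn' with ⟨h1, h2, h3⟩
      have hdrop := pv_filter_drop UB seen w (hl w List.mem_cons_self) hw
      refine ⟨h1, ?_, ?_⟩
      · calc seen.length ≤ (seen ++ [w]).length := by simp
          _ ≤ _ := h2
      · have hlen : (seen ++ [w]).length = seen.length + 1 := by simp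
        omega


theorem pv_freshcount (U : List String) : ∀ (N seen : List String), N.Nodup →
    (∀ x ∈ N, x ∈ U ∧ x ∉ seen) →
    (U.filter (fun x => !(seen ++ N).contains x)).length + N.length ≤
    (U.filter (fun x => !seen.contains x)).length := by
  intro N
  induction N with
  | nil => intro seen _ _; simp
  | cons n N ih =>
    intro seen hnd hmem
    have hn : n ∈ U ∧ n ∉ seen := hmem n List.mem_cons_self
    have hdrop := pv_filter_drop U seen n hn.1 hn.2
    have hstep := ih (seen ++ [n]) (List.Nodup.of_cons hnd)
      (fun x hx => ⟨(hmem x (List.mem_cons_of_mem _ hx)).1, by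
        have hxs := (hmem x (List.mem_cons_of_mem _ hx)).2
        have hxn : x ≠ n := by
          intro h; subst h
          exact (List.nodup_cons.1 hnd).1 hx
        simp [hxs, hxn]⟩)
    have hassoc : seen ++ n :: N = (seen ++ [n]) ++ N := by simp
    rw [hassoc]
    simp only [List.length_cons]
    omega


theorem pv_qlevel (g : String → List String) : ∀ (cur pre tail : List String) (fuel : Nat),
    pvReach g (cur.length + fuel) (pre ++ cur ++ tail) pre.length =
    pvReach g fuel (cur.foldl (fun s v => List.foldl PySem.Set.add s (g v)) (pre ++ cur ++ tail))
      (pre.length + cur.length) := by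
  intro cur
  induction cur with
  | nil => intro pre tail fuel; simp
  | cons c cs ih =>
    intro pre tail fuel
    have hlen : pre.length < (pre ++ (c :: cs) ++ tail).length := by simp
    have hfu : (c :: cs).length + fuel = (cs.length + fuel) + 1 := by simp; omega
    rw [hfu, pvReach_step g (cs.length + fuel) _ _ hlen]
    have hidx : (pre ++ (c :: cs) ++ tail)[pre.length]'hlen = c := by
      simp [List.getElem_append_right]
    simp only [hidx]
    rcases pv_foldl_add_prefix (g c) (pre ++ (c :: cs) ++ tail) with ⟨δ, hδ⟩
    have hre : (g c).foldl PySem.Set.add (pre ++ (c :: cs) ++ tail)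
        = (pre ++ [c]) ++ cs ++ (tail ++ δ) := by
      rw [hδ]; simp
    rw [hre]
    have hih := ih (pre ++ [c]) (tail ++ δ) fuel
    have h1 : (pre ++ [c]).length = pre.length + 1 := by simp
    rw [h1] at hih
    rw [hih]
    congr 1
    · simp only [List.foldl_cons]
      rw [hre]
    · simp
      omega


theorem pv_qstab (g : String → List String) (UB : List String)
    (HgB : ∀ v w, w ∈ g v → w ∈ UB) : ∀ (fuel fuel' : Nat) (seen : List String) (i : Nat),
    seen.Nodup →
    seen.length - i + (UB.filter (fun x => !seen.contains x)).length + 1 ≤ fuel →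
    seen.length - i + (UB.filter (fun x => !seen.contains x)).length + 1 ≤ fuel' →
    pvReach g fuel seen i = pvReach g fuel' seen i := by
  intro fuel
  induction fuel with
  | zero => intro fuel' seen i _ h1 _; omega
  | succ a ih =>
    intro fuel' seen i hn h1 h2
    cases fuel' with
    | zero => omega
    | succ b =>
      by_cases h : i < seen.length
      · rw [pvReach_step _ _ _ _ h, pvReach_step _ _ _ _ h]
        rcases pv_addfold_count UB (g seen[i]) seen (fun w hw => HgB _ _ hw) hn with ⟨hn2, hle, hcnt⟩
        have hb1 : (List.foldl PySem.Set.add seen (g seen[i])).length - (i + 1) +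
            (UB.filter (fun x => !(List.foldl PySem.Set.add seen (g seen[i])).contains x)).length + 1 ≤ a := by
          omega
        have hb2 : (List.foldl PySem.Set.add seen (g seen[i])).length - (i + 1) +
            (UB.filter (fun x => !(List.foldl PySem.Set.add seen (g seen[i])).contains x)).length + 1 ≤ b := by
          omega
        exact ih b _ _ hn2 hb1 hb2
      · rw [pvReach_stop _ _ _ _ h, pvReach_stop _ _ _ _ h]


theorem pv_couple (f g : String → List String) (UA UB : List String)
    (Hfg : ∀ v s, List.foldl PySem.Set.add s (f v) = List.foldl PySem.Set.add s (g v))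
    (HfA : ∀ v w, w ∈ f v → w ∈ UA) (HgB : ∀ v w, w ∈ g v → w ∈ UB) :
    ∀ (fuelL : Nat) (fuelQ : Nat) (V : PySem.Set String) (cur : List String),
    (V ++ cur).Nodup →
    (cur = [] → 1 ≤ fuelL) →
    (cur ≠ [] → 2 + (UA.filter (fun x => !List.contains (V ++ cur) x)).length ≤ fuelL) →
    cur.length + (UB.filter (fun x => !List.contains (V ++ cur) x)).length + 1 ≤ fuelQ →
    pvBfsLoop f fuelL V cur = pvReach g fuelQ (V ++ cur) V.length := by
  have hmem : ∀ v x, x ∈ f v ↔ x ∈ g v := by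
    intro v x
    have h := Hfg v []
    constructor
    · intro hx
      have : x ∈ PySem.Set.ofList (g v) := by
        rw [PySem.Set.ofList_eq_foldl, ← h, ← PySem.Set.ofList_eq_foldl]
        exact (PySem.Set.mem_ofList _ _).2 hx
      exact (PySem.Set.mem_ofList _ _).1 this
    · intro hx
      have : x ∈ PySem.Set.ofList (f v) := by
        rw [PySem.Set.ofList_eq_foldl, h, ← PySem.Set.ofList_eq_foldl]
        exact (PySem.Set.mem_ofList _ _).2 hx
      exact (PySem.Set.mem_ofList _ _).1 this
  intro fuelL
  induction fuelL with
  | zero =>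
    intro fuelQ V cur hnd h0 h1 hq
    cases cur with
    | nil => exact absurd (h0 rfl) (by omega)
    | cons c cs => exact absurd (h1 (by simp)) (by omega)
  | succ m ih =>
    intro fuelQ V cur hnd h0 h1 hq
    cases cur with
    | nil =>
      rw [pvReach_stop g fuelQ (V ++ []) V.length (by simp)]
      simp [pvBfsLoop]
    | cons c cs =>
      have hnodups := List.nodup_append.1 hnd
      have hfresh : ∀ x ∈ c :: cs, x ∉ V := fun x hx hv => hnodups.2.2 x hv x hx rfl
      have hupd : PySem.Set.update V (c :: cs) = V ++ (c :: cs) :=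
        PySem.Set.update_eq_append_of_disjoint V _ hnodups.2.1 hfresh
      rw [pvBfsLoop_cons, hupd]
      set cur := c :: cs with hcur
      set N := pvNext f (V ++ cur) cur with hN
      rcases pvNext_props f (V ++ cur) cur with ⟨hNnd, hNmem⟩
      have hNfresh : ∀ x ∈ N, x ∉ V ++ cur := fun x hx => (hNmem x hx).2
      have hNfA : ∀ x ∈ N, x ∈ UA := by
        intro x hx
        rcases (hNmem x hx).1 with ⟨v, _, hv⟩
        exact HfA v x hv
      have hNgB : ∀ x ∈ N, x ∈ UB := by
        intro x hx
        rcases (hNmem x hx).1 with ⟨v, _, hv⟩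
        exact HgB v x ((hmem v x).1 hv)
      have hndVN : (V ++ cur ++ N).Nodup := by
        rw [List.nodup_append]
        exact ⟨hnd, hNnd, fun a ha b hb he => hNfresh b hb (he ▸ ha)⟩
      -- queue side: re-chunk fuel, process one level, rewrite folds
      have hlen : (V ++ cur).length - V.length = cur.length := by simp
      have hstab := pv_qstab g UB HgB fuelQ (cur.length + fuelQ) (V ++ cur) V.length hnd
        (by rw [hlen] at *; omega) (by rw [hlen] at *; omega)
      have hql := pv_qlevel g cur V [] fuelQ
      simp only [List.append_nil] at hql
      have hgf : cur.foldl (fun s v => List.foldl PySem.Set.add s (g v)) (V ++ cur)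
          = cur.foldl (fun s v => List.foldl PySem.Set.add s (f v)) (V ++ cur) :=
        PySem.List.foldl_congr_mem _ _ _ _ (fun acc x _ => (Hfg x acc).symm)
      have hlf := pv_level_fold f cur (V ++ cur) []
      simp only [List.append_nil] at hlf
      have hlevel : cur.foldl (fun s v => List.foldl PySem.Set.add s (g v)) (V ++ cur)
          = (V ++ cur) ++ N := by
        rw [hgf, hlf]
        rfl
      rw [hstab, hql, hlevel]
      -- apply the induction hypothesis at the next level
      have hfc := pv_freshcount UA N (V ++ cur) hNnd (fun x hx => ⟨hNfA x hx, hNfresh x hx⟩)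
      have hfcB := pv_freshcount UB N (V ++ cur) hNnd (fun x hx => ⟨hNgB x hx, hNfresh x hx⟩)
      have h1' := h1 (by simp [hcur])
      have hih := ih fuelQ (V ++ cur) N hndVN
        (fun _ => by omega)
        (fun hNne => by
          have : 1 ≤ N.length := by
            cases hNe : N with
            | nil => exact absurd hNe hNne
            | cons a b => simp
          omega)
        (by
          have hc1 : 1 ≤ cur.length := by simp [hcur]
          omega)
      rw [hih]
      congr 1
      simp


theorem pv_getD_sub_flatten (d : PySem.Dict String (List String)) (v w : String)
    (h : w ∈ d.getD v []) : w ∈ d.values.flatten := by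
  rcases hf : d.get? v with _ | l
  · rw [PySem.Dict.getD_eq_get?_getD, hf] at h
    cases h
  · rw [PySem.Dict.getD_eq_get?_getD, hf] at h
    simp only [Option.getD_some] at h
    unfold PySem.Dict.get? at hf
    rcases hp : List.find? (fun p => p.1 == v) d.items with _ | p
    · rw [hp] at hf; cases hf
    · rw [hp] at hf
      simp only [Option.map_some] at hf
      have hpm := List.mem_of_find?_eq_some hp
      have hl : p.2 = l := Option.some.inj hf
      have : l ∈ d.values := hl ▸ List.mem_map_of_mem hpm
      exact List.mem_flatten.2 ⟨l, this, h⟩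


theorem pv_preds_sub_keys (d : PySem.Dict String (List String)) (v w : String)
    (h : w ∈ pvPreds d v) : w ∈ d.keys := by
  unfold pvPreds at h
  rcases List.mem_map.1 h with ⟨p, hp, rfl⟩
  exact List.mem_map_of_mem (List.mem_of_mem_filter hp)


theorem pv_rev_flat : ∀ (l : List (String × List String)) (d : PySem.Dict String (List String)),
    l.foldl (fun rG p => p.2.foldl (fun rG v => rG.modify v [] (fun xs => xs ++ [p.1])) rG) d =
    (l.flatMap fun p => p.2.map fun w => (w, p.1)).foldl
      (fun rG q => rG.modify q.1 [] (fun xs => xs ++ [q.2])) d := by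
  intro l
  induction l with
  | nil => intro d; rfl
  | cons p ps ih =>
    intro d
    simp only [List.foldl_cons, List.flatMap_cons, List.foldl_append]
    rw [ih, List.foldl_map]

theorem pv_foldl_add_map_const {β : Type} (l : List β) (u : String) (s : PySem.Set String) :
    List.foldl PySem.Set.add s (l.map fun _ => u) =
    if l.isEmpty then s else PySem.Set.add s u := by
  induction l generalizing s with
  | nil => rfl
  | cons b l ih =>
    simp only [List.map_cons, List.foldl_cons, List.isEmpty_cons]
    rw [ih]
    by_cases h : l.isEmpty
    · rw [if_pos h]
      simp
    · rw [if_neg h, PySem.Set.add_of_mem (by simp [PySem.Set.mem_add] : u ∈ PySem.Set.add s u)]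
      simp

theorem pv_pred_fold : ∀ (ps : List (String × List String)) (v : String) (s : PySem.Set String),
    List.foldl PySem.Set.add s (ps.flatMap fun p => (p.2.filter (· == v)).map (fun _ => p.1)) =
    List.foldl PySem.Set.add s ((ps.filter fun p => p.2.contains v).map (fun p => p.1)) := by
  intro ps
  induction ps with
  | nil => intro v s; rfl
  | cons p ps ih =>
    intro v s
    simp only [List.flatMap_cons, List.foldl_append, List.filter_cons]
    by_cases hc : p.2.contains v = true
    · rw [if_pos hc]
      have hvmem : v ∈ p.2 := by simpa [List.contains_eq_mem] using hc
      have hne : p.2.filter (· == v) ≠ [] :=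
        List.ne_nil_of_mem (List.mem_filter.2 ⟨hvmem, by simp⟩)
      rw [pv_foldl_add_map_const, if_neg (by simpa using hne)]
      simp only [List.map_cons, List.foldl_cons]
      exact ih v _
    · rw [if_neg hc]
      have hvnot : v ∉ p.2 := by simpa [List.contains_eq_mem] using hc
      have hnil : p.2.filter (· == v) = [] := by
        rw [List.filter_eq_nil_iff]
        intro a ha hb
        exact hvnot ((eq_of_beq hb) ▸ ha)
      rw [hnil]
      simp only [List.map_nil, List.foldl_nil]
      exact ih v s

theorem pv_rev_getD (G : PySem.Dict String (List String)) (v : String) :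
    (pvRevGraph G).getD v [] =
    G.items.flatMap (fun p => (p.2.filter (· == v)).map (fun _ => p.1)) := by
  unfold pvRevGraph
  rw [pv_rev_flat]
  rw [PySem.Dict.getD_foldl_modify_append]
  rw [PySem.Dict.getD_empty]
  simp only [List.nil_append, List.filter_flatMap, List.map_flatMap]
  congr 1
  funext p
  rw [List.filter_map, List.map_map]
  congr 1


theorem pv_hfg_rev (G : PySem.Dict String (List String)) (v : String) (s : PySem.Set String) :
    List.foldl PySem.Set.add s ((pvRevGraph G).getD v []) =
    List.foldl PySem.Set.add s (pvPreds G v) := by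
  rw [pv_rev_getD]
  unfold pvPreds
  exact pv_pred_fold G.items v s


theorem pv_eq_rev (d : PySem.Dict String (List String)) (node : String) :
    bfs_graph (pvRevGraph d) node = pvReach (fun v => pvPreds d v) (d.size + 2) [node] 0 := by
  unfold bfs_graph
  have hsz : d.keys.length = d.size := by
    simp [PySem.Dict.keys, PySem.Dict.size]
  have h := pv_couple (fun v => (pvRevGraph d).getD v []) (fun v => pvPreds d v)
      ((pvRevGraph d).values.flatten) d.keys
      (fun v s => pv_hfg_rev d v s)
      (fun v w hw => pv_getD_sub_flatten (pvRevGraph d) v w hw)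
      (fun v w hw => pv_preds_sub_keys d v w hw)
      ((pvRevGraph d).values.flatten.length + 2) (d.size + 2) [] [node]
      (by simp)
      (by intro hh; exact absurd hh (by simp))
      (by
        intro _
        have := List.length_filter_le (fun x => !List.contains ([] ++ [node]) x)
          ((pvRevGraph d).values.flatten)
        omega)
      (by
        have := List.length_filter_le (fun x => !List.contains ([] ++ [node]) x) d.keys
        simp only [List.length_cons, List.length_nil]
        omega)
  simpa using h


theorem pv_eq_fwd (d : PySem.Dict String (List String)) (node : String) :
    bfs_graph d node = pvReach (fun v => d.getD v []) (d.values.flatten.length + 2) [node] 0 := by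
  unfold bfs_graph
  have h := pv_couple (fun v => d.getD v []) (fun v => d.getD v [])
      (d.values.flatten) (d.values.flatten)
      (fun v s => rfl)
      (fun v w hw => pv_getD_sub_flatten d v w hw)
      (fun v w hw => pv_getD_sub_flatten d v w hw)
      (d.values.flatten.length + 2) (d.values.flatten.length + 2) [] [node]
      (by simp)
      (by intro hh; exact absurd hh (by simp))
      (by
        intro _
        have := List.length_filter_le (fun x => !List.contains ([] ++ [node]) x) d.values.flatten
        omega)
      (by
        have := List.length_filter_le (fun x => !List.contains ([] ++ [node]) x) d.values.flatten
        simp only [List.length_cons, List.length_nil]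
        omega)
  simpa using h


-- ===== VERDICT (by name: the statement is the Claim_ definition above) =====
theorem merge_graph_spec : Claim_equal_merge_graph := by
  unfold Claim_equal_merge_graph
  intro graph_l root_l graph_r root_r hdom hpre
  unfold Spec_merge_graph
  simp only [merge_graph, merge_graph_alt]
  have hkl : PySem.Set.ofList (PySem.Dict.ofList graph_l).keys = (PySem.Dict.ofList graph_l).keys :=
    PySem.Set.ofList_eq_self_of_nodup _ (PySem.Dict.nodup_keys_ofList graph_l)
  have hcommon : PySem.Set.inter (PySem.Set.ofList (PySem.Dict.ofList graph_l).keys)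
      (PySem.Set.ofList (PySem.Dict.ofList graph_r).keys)
      = (PySem.Dict.ofList graph_l).keys.filter (fun u => (PySem.Dict.ofList graph_r).contains u) := by
    unfold PySem.Set.inter
    rw [hkl]
    apply List.filter_congr
    intro x _
    rw [Bool.eq_iff_iff]
    rw [PySem.Set.contains_iff, PySem.Set.mem_ofList, PySem.Dict.contains_iff_mem_keys]
  have hcnodup : ((PySem.Dict.ofList graph_l).keys.filter
      (fun u => (PySem.Dict.ofList graph_r).contains u)).Nodup :=
    (PySem.Dict.nodup_keys_ofList graph_l).filter _
  have hinitA : PySem.Set.union PySem.Set.empty ((PySem.Dict.ofList graph_l).keys.filter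
      (fun u => (PySem.Dict.ofList graph_r).contains u))
      = (PySem.Dict.ofList graph_l).keys.filter (fun u => (PySem.Dict.ofList graph_r).contains u) := by
    unfold PySem.Set.union PySem.Set.update
    rw [show List.foldl PySem.Set.add PySem.Set.empty ((PySem.Dict.ofList graph_l).keys.filter
      (fun u => (PySem.Dict.ofList graph_r).contains u)) = PySem.Set.ofList ((PySem.Dict.ofList graph_l).keys.filter
      (fun u => (PySem.Dict.ofList graph_r).contains u)) from rfl]
    exact PySem.Set.ofList_eq_self_of_nodup _ hcnodup
  have hinitB : PySem.Set.ofList ((PySem.Dict.ofList graph_l).keys.filter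
      (fun u => (PySem.Dict.ofList graph_r).contains u))
      = (PySem.Dict.ofList graph_l).keys.filter (fun u => (PySem.Dict.ofList graph_r).contains u) :=
    PySem.Set.ofList_eq_self_of_nodup _ hcnodup
  rw [hcommon, hinitA, hinitB]
  apply PySem.List.foldl_congr_mem
  intro acc node _
  rw [pv_eq_rev (PySem.Dict.ofList graph_l) node, pv_eq_rev (PySem.Dict.ofList graph_r) node,
    pv_eq_fwd (PySem.Dict.ofList graph_l) node, pv_eq_fwd (PySem.Dict.ofList graph_r) node]
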